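-- pv_equiv track=rewrite | github.com/andylws/SNU_Lecture_Computing-for-Data-Science | HW4/P7.py | P7
-- ===== SOURCE A (Python) =====
-- def P7(dct):
--     hasCriterion = False
--     for key in dct:
--         if not hasCriterion:
--             keySet = dct[key].keys()
--             hasCriterion = True
--             continue
--         if dct[key].keys() == keySet:
--             continue
--         else:
--             return False
--
--     return True
-- ===== SOURCE B (Python) =====
-- def P7(dct):
--     return len({frozenset(dct[key].keys()) for key in dct}) <= 1
-- ===== Notes on version B (the rewrite author's own statement) =====
-- stated objective: idiomatic
-- what changed: Replaces A's reference-capture flag plus pairwise comparison loop with one set comprehension collecting every nested key set as a frozenset and checking that at most one distinct key set exists.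
import Mathlib
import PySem

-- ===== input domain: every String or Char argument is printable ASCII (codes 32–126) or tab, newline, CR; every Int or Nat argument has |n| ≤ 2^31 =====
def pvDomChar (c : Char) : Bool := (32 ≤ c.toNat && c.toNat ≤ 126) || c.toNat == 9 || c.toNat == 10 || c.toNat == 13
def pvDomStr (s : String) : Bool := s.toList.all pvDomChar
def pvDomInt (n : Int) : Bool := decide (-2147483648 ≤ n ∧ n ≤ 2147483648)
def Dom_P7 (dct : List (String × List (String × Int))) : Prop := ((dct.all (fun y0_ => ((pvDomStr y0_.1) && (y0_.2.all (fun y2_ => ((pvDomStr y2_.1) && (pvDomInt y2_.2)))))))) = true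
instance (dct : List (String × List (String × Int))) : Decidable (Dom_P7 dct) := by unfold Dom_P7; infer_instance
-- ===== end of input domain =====

-- B replaces A's reference-capture flag and pairwise early-exit scan with one set
-- comprehension collecting every nested key set and checking at most one is distinct (idiomatic).

-- ===== PORT A =====
-- dct[key]: first-match association-list lookup
def pvLookupD (dct : List (String × List (String × Int))) (k : String) : List (String × Int) :=
  (List.lookup k dct).getD []

-- dct[key].keys(): the distinct keys of the nested dict (a dict's keys are unique)
def pvKeys (v : List (String × Int)) : PySem.Set String :=
  PySem.Set.ofList (v.map Prod.fst)

-- A's loop over the keys of dct, with state = none (hasCriterion false) or some keySet;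
-- Python's keys() == keySet is set equality (PySem.Set.equal)
def P7Loop (dct : List (String × List (String × Int))) :
    List String → Option (PySem.Set String) → Bool
  | [], _ => true
  | k :: ks, none => P7Loop dct ks (some (pvKeys (pvLookupD dct k)))
  | k :: ks, some s =>
      if PySem.Set.equal (pvKeys (pvLookupD dct k)) s then P7Loop dct ks (some s) else false

def P7 (dct : List (String × List (String × Int))) : Bool :=
  P7Loop dct (dct.map Prod.fst) none

-- ===== PORT B =====
-- frozenset(dct[key].keys()): a frozenset is represented canonically by the sorted list of
-- its distinct elements, so that list equality coincides with frozenset (set) equality — exact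
def pvFrozen (v : List (String × Int)) : List String :=
  PySem.List.sorted (PySem.Set.ofList (v.map Prod.fst)) (fun x => x) false

-- len({frozenset(dct[key].keys()) for key in dct}) <= 1
def P7_alt (dct : List (String × List (String × Int))) : Bool :=
  decide (PySem.Set.len
    (PySem.Set.ofList ((dct.map Prod.fst).map (fun k => pvFrozen (pvLookupD dct k)))) ≤ 1)

-- ===== PRECONDITION & SPEC =====
def Spec_P7 (dct : List (String × List (String × Int))) (out : Bool) : Prop := out = P7_alt dct
instance (dct : List (String × List (String × Int))) (out : Bool) : Decidable (Spec_P7 dct out) := by unfold Spec_P7; infer_instance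

-- ===== CLAIM (what is proved, stated in full; the proofs are below) =====
def Claim_equal_P7 : Prop := ∀ (dct : List (String × List (String × Int))), Dom_P7 dct → Spec_P7 dct (P7 dct)

-- ===== LEMMAS AND PROOFS =====

-- set equality of two key sets ↔ equality of their canonical (sorted) forms
theorem pv_equal_iff_frozen (v w : List (String × Int)) :
    PySem.Set.equal (pvKeys v) (pvKeys w) = true ↔ pvFrozen v = pvFrozen w := by
  rw [PySem.Set.equal_iff, pvFrozen, pvFrozen,
      PySem.List.sorted_id_eq_sorted_id_iff_perm,
      List.perm_ext_iff_of_nodup (PySem.Set.nodup_ofList _) (PySem.Set.nodup_ofList _)]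
  exact Iff.rfl

-- a set built from c :: l has at most one element iff every element of l equals c
theorem pv_ofList_len_le_one {α : Type} [BEq α] [LawfulBEq α] (c : α) (l : List α) :
    PySem.Set.len (PySem.Set.ofList (c :: l)) ≤ 1 ↔ ∀ x ∈ l, x = c := by
  rw [PySem.Set.ofList_cons]
  constructor
  · intro h x hx
    by_contra hne
    have hmem : x ∈ PySem.Set.discard (PySem.Set.ofList l) c := by
      rw [PySem.Set.mem_discard]
      exact ⟨(PySem.Set.mem_ofList _ _).mpr hx, hne⟩
    cases hd : PySem.Set.discard (PySem.Set.ofList l) c with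
    | nil => rw [hd] at hmem; exact absurd hmem (List.not_mem_nil)
    | cons y ys =>
        simp only [PySem.Set.len, hd, List.length_cons] at h
        omega
  · intro h
    have : PySem.Set.discard (PySem.Set.ofList l) c = [] := by
      apply List.eq_nil_iff_forall_not_mem.mpr
      intro y hy
      rw [PySem.Set.mem_discard, PySem.Set.mem_ofList] at hy
      exact hy.2 (h y hy.1)
    simp [PySem.Set.len, this]

-- A's loop with the criterion captured: true iff every remaining key set equals it
theorem pv_loop_some (dct : List (String × List (String × Int)))
    (ks : List String) (s : PySem.Set String) :
    P7Loop dct ks (some s) = true ↔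
      ∀ k ∈ ks, PySem.Set.equal (pvKeys (pvLookupD dct k)) s = true := by
  induction ks with
  | nil => simp [P7Loop]
  | cons k ks ih =>
      simp only [P7Loop, List.forall_mem_cons]
      split_ifs with h
      · rw [ih]; simp only [h, true_and]
      · simp only [false_iff]
        intro hc; exact h hc.1

-- ===== VERDICT (by name: the statement is the Claim_ definition above) =====
theorem P7_spec : Claim_equal_P7 := by
  intro dct _
  unfold Spec_P7 P7 P7_alt
  cases hks : dct.map Prod.fst with
  | nil => simp [P7Loop, PySem.Set.len]
  | cons k0 ks =>
      rw [Bool.eq_iff_iff]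
      simp only [P7Loop, pv_loop_some, List.map_cons, decide_eq_true_iff,
        pv_ofList_len_le_one]
      constructor
      · intro h x hx
        rcases List.mem_map.mp hx with ⟨k, hk, rfl⟩
        exact (pv_equal_iff_frozen _ _).mp (h k hk)
      · intro h k hk
        exact (pv_equal_iff_frozen _ _).mpr
          (h _ (List.mem_map.mpr ⟨k, hk, rfl⟩))
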